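-- pv_equiv track=rewrite | github.com/nicolasgorrity/advent_of_code | 2020/ex12/ex.py | count_moves_in_each_orientation
-- ===== SOURCE A (Python) =====
-- from typing import Iterable, Iterator, Tuple, Mapping
--
-- NORTH = 'N'
--
-- EAST = 'E'
--
-- WEST = 'W'
--
-- SOUTH = 'S'
--
-- LEFT = 'L'
--
-- RIGHT = 'R'
--
-- FORWARD = 'F'
--
-- BACK = 'B'
--
-- direction_to_orientation = {
--     RIGHT: {
--         NORTH: EAST,
--         EAST: SOUTH,
--         SOUTH: WEST,
--         WEST: NORTH
--     },
--     LEFT: {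
--         NORTH: WEST,
--         WEST: SOUTH,
--         SOUTH: EAST,
--         EAST: NORTH
--     },
--     BACK: {
--         NORTH: SOUTH,
--         SOUTH: NORTH,
--         EAST: WEST,
--         WEST: EAST
--     }
-- }
--
-- def direction_from_angle(initial_direction: str, angle: int) -> str:
--     if initial_direction not in {RIGHT, LEFT}:
--         return initial_direction
--
--     if angle == 90:
--         return initial_direction
--     elif angle == 180:
--         return BACK
--     elif angle == 270:
--         return LEFT if initial_direction == RIGHT else RIGHT
--
-- def count_moves_in_each_orientation(actions: Iterator[Tuple[str, int]],
--                                     initial_direction: str = EAST) -> Mapping[str, int]: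
--     current_direction = initial_direction
--     counts = {NORTH: 0, EAST: 0, WEST: 0, SOUTH: 0}
--
--     for i, (action, parameter) in enumerate(actions):
--         if action == FORWARD:
--             counts[current_direction] += parameter
--
--         elif action in {LEFT, RIGHT}:
--             action_90deg = direction_from_angle(action, parameter)
--             current_direction = direction_to_orientation[action_90deg][current_direction]
--
--         else:
--             counts[action] += parameter
--
--     return counts
-- ===== SOURCE B (Python) =====
-- NORTH = 'N'
-- EAST = 'E'
-- WEST = 'W'
-- SOUTH = 'S'
-- LEFT = 'L'
-- RIGHT = 'R'
-- FORWARD = 'F'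
--
-- ORDER = ('N', 'E', 'S', 'W')
-- STEP = {90: 1, 180: 2, 270: 3}
--
--
-- def _turn(action, parameter):
--     """Signed quarter-turn contribution of one action."""
--     if action == RIGHT:
--         return STEP[parameter]
--     if action == LEFT:
--         return -STEP[parameter]
--     return 0
--
--
-- def count_moves_in_each_orientation(actions, initial_direction=EAST):
--     actions = list(actions)
--     # Stage 1: prefix-sum of rotations -> net quarter-turns BEFORE each action.
--     rots = [0]
--     for a, p in actions:
--         rots.append(rots[-1] + _turn(a, p))
--     # Stage 2: rewrite every move to the cardinal it happens in, dropping turns.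
--     moves = [(ORDER[(ORDER.index(initial_direction) + r) % 4] if a == FORWARD else a, p)
--              for (a, p), r in zip(actions, rots)
--              if a not in (LEFT, RIGHT)]
--     # Stage 3: aggregate per direction.
--     counts = {NORTH: 0, EAST: 0, WEST: 0, SOUTH: 0}
--     for d, p in moves:
--         counts[d] += p
--     return counts
-- ===== Notes on version B (the rewrite author's own statement) =====
-- stated objective: alternative
-- what changed: B replaces A's stateful single-pass simulation (current-direction string updated through nested rotation dictionaries) by three stages: a prefix-sum of signed quarter-turns, a rewriting pass that resolves each F to its cardinal via cyclic index arithmetic and drops the turn actions, and a final aggregation of parameters per direction.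
import Mathlib
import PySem

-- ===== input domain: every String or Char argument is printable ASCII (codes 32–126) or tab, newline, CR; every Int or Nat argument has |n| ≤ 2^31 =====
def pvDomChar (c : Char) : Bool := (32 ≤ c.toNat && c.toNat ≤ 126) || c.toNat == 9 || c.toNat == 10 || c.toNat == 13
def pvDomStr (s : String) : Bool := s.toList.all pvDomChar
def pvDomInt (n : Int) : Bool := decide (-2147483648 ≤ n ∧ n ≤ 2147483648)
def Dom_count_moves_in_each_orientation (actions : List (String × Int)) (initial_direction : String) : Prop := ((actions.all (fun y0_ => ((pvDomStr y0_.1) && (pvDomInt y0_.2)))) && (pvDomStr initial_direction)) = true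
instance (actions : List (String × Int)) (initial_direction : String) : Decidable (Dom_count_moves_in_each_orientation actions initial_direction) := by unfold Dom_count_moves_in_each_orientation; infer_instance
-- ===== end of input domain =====

-- B replaces A's stateful single-pass simulation by three staged passes: a prefix-sum of
-- signed quarter-turns, a rewrite of each F to its cardinal (dropping the turn actions),
-- and a final aggregation per direction (objective: alternative; same O(n) cost).

-- ===== PORT A =====
def direction_from_angle (initial_direction : String) (angle : Int) : Option String :=
  if ¬ (initial_direction = "R" ∨ initial_direction = "L") then some initial_direction
  else if angle = 90 then some initial_direction
  else if angle = 180 then some "B"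
  else if angle = 270 then some (if initial_direction = "R" then "L" else "R")
  else none  -- Python falls off the function: returns None

def direction_to_orientation : PySem.Dict String (PySem.Dict String String) :=
  PySem.Dict.ofList
    [("R", PySem.Dict.ofList [("N","E"),("E","S"),("S","W"),("W","N")]),
     ("L", PySem.Dict.ofList [("N","W"),("W","S"),("S","E"),("E","N")]),
     ("B", PySem.Dict.ofList [("N","S"),("S","N"),("E","W"),("W","E")])]

-- one iteration of A's for-loop; the .getD defaults stand for KeyErrors, excluded by Pre_
-- (counts[x] += p is ported as insert x (getD x 0 + p): inside Pre_ the key is always present,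
--  so this is Python's in-place update)
def pvAStep (st : String × PySem.Dict String Int) (e : Int × (String × Int)) :
    String × PySem.Dict String Int :=
  let dir := st.1; let counts := st.2
  let action := e.2.1; let parameter := e.2.2
  if action = "F" then
    (dir, counts.insert dir (counts.getD dir 0 + parameter))
  else if action = "L" ∨ action = "R" then
    let action_90deg := (direction_from_angle action parameter).getD ""
    ((((direction_to_orientation.get? action_90deg).getD PySem.Dict.empty).get? dir).getD "",
     counts)
  else
    (dir, counts.insert action (counts.getD action 0 + parameter))

def count_moves_in_each_orientation (actions : List (String × Int)) (initial_direction : String) : List (String × Int) :=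
  let counts : PySem.Dict String Int := PySem.Dict.ofList [("N",0),("E",0),("W",0),("S",0)]
  (((PySem.List.enumerate actions).foldl pvAStep (initial_direction, counts)).2).items

-- ===== PORT B =====
def pvOrder : List String := ["N", "E", "S", "W"]

def pvStepTable : PySem.Dict Int Int := PySem.Dict.ofList [(90,1),(180,2),(270,3)]

-- Source B's _turn; the .getD 0 stands for the KeyError on other angles, excluded by Pre_
def pvTurn (action : String) (parameter : Int) : Int :=
  if action = "R" then (pvStepTable.get? parameter).getD 0
  else if action = "L" then -((pvStepTable.get? parameter).getD 0)
  else 0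

-- Source B's expression ORDER[(ORDER.index(initial_direction) + r) % 4]; the .getD defaults stand
-- for the ValueError on an initial_direction outside the cycle, excluded by Pre_
def pvKey (initial_direction : String) (r : Int) : String :=
  (PySem.List.pyGet? pvOrder
    (PySem.Int.mod ((((PySem.List.index? pvOrder initial_direction).getD 0 : Nat) : Int) + r) 4)).getD ""

def count_moves_in_each_orientation_alt (actions : List (String × Int)) (initial_direction : String) : List (String × Int) :=
  -- Stage 1: prefix rotations (Python's rots[-1] ported as pyGet? rs (-1))
  let rots := actions.foldl
    (fun rs ap => rs ++ [(PySem.List.pyGet? rs (-1)).getD 0 + pvTurn ap.1 ap.2]) [0]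
  -- Stage 2: the comprehension: filter out the turn actions, resolve each F
  let moves := ((actions.zip rots).filter
      (fun x => decide (x.1.1 ≠ "L" ∧ x.1.1 ≠ "R"))).map
    (fun x => ((if x.1.1 = "F" then pvKey initial_direction x.2 else x.1.1), x.1.2))
  -- Stage 3: aggregation per direction
  let counts : PySem.Dict String Int := PySem.Dict.ofList [("N",0),("E",0),("W",0),("S",0)]
  (moves.foldl (fun c dp => c.insert dp.1 (c.getD dp.1 0 + dp.2)) counts).items

-- ===== PRECONDITION & SPEC =====
-- Pre_ excludes exactly the inputs on which A raises a KeyError: an action that is none of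
-- F/N/E/S/W/L/R, a rotation angle outside {90, 180, 270}, and an initial_direction outside the
-- N/E/S/W cycle as soon as some action consults the heading (A returns iff every action is
-- valid and the heading is either a cardinal or never consulted, i.e. all actions cardinal).
def Pre_count_moves_in_each_orientation (actions : List (String × Int)) (initial_direction : String) : Prop :=
  (∀ ap ∈ actions, ap.1 = "F" ∨ ap.1 ∈ (["N", "E", "S", "W"] : List String) ∨
    ((ap.1 = "L" ∨ ap.1 = "R") ∧ (ap.2 = 90 ∨ ap.2 = 180 ∨ ap.2 = 270))) ∧
  (initial_direction ∈ ["N", "E", "S", "W"] ∨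
    ∀ ap ∈ actions, ap.1 ∈ (["N", "E", "S", "W"] : List String))
instance (actions : List (String × Int)) (initial_direction : String) : Decidable (Pre_count_moves_in_each_orientation actions initial_direction) := by unfold Pre_count_moves_in_each_orientation; infer_instance

def pvWitness_count_moves_in_each_orientation : (List (String × Int)) × String :=
  ([("F", 10), ("R", 90), ("F", 3), ("L", 270), ("N", 2)], "E")

def Spec_count_moves_in_each_orientation (actions : List (String × Int)) (initial_direction : String) (out : List (String × Int)) : Prop := out = count_moves_in_each_orientation_alt actions initial_direction
instance (actions : List (String × Int)) (initial_direction : String) (out : List (String × Int)) : Decidable (Spec_count_moves_in_each_orientation actions initial_direction out) := by unfold Spec_count_moves_in_each_orientation; infer_instance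

-- ===== CLAIM (what is proved, stated in full; the proofs are below) =====
def Claim_equal_count_moves_in_each_orientation : Prop := ∀ (actions : List (String × Int)) (initial_direction : String), Dom_count_moves_in_each_orientation actions initial_direction → Pre_count_moves_in_each_orientation actions initial_direction → Spec_count_moves_in_each_orientation actions initial_direction (count_moves_in_each_orientation actions initial_direction)

-- ===== LEMMAS AND PROOFS =====

-- the rotation values Stage 1 appends after a running total r
def pvTailScan (r : Int) : List (String × Int) → List Int
  | [] => []
  | ap :: tl => (r + pvTurn ap.1 ap.2) :: pvTailScan (r + pvTurn ap.1 ap.2) tl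

-- Stage 1's fold characterised
lemma pvRots_eq (acts : List (String × Int)) :
    ∀ (l : List Int) (r : Int),
      acts.foldl (fun rs ap => rs ++ [(PySem.List.pyGet? rs (-1)).getD 0 + pvTurn ap.1 ap.2])
        (l ++ [r]) = l ++ [r] ++ pvTailScan r acts := by
  induction acts with
  | nil => intro l r; simp [pvTailScan]
  | cons hd tl ih =>
      intro l r
      simp only [List.foldl_cons, pvTailScan]
      rw [PySem.List.pyGet?_neg_one_append_singleton]
      have := ih (l ++ [r]) (r + pvTurn hd.1 hd.2)
      simpa using this

-- Stage 2 combined with Stage 1's output: the resolved move list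
def pvResolve (init : String) (rot : Int) : List (String × Int) → List (String × Int)
  | [] => []
  | (a, p) :: tl =>
      if a = "L" ∨ a = "R" then pvResolve init (rot + pvTurn a p) tl
      else ((if a = "F" then pvKey init rot else a), p)
        :: pvResolve init (rot + pvTurn a p) tl

lemma pvMoves_eq (init : String) (acts : List (String × Int)) :
    ∀ (rot : Int),
      (((acts.zip (rot :: pvTailScan rot acts)).filter
          (fun x => decide (x.1.1 ≠ "L" ∧ x.1.1 ≠ "R"))).map
        (fun x => ((if x.1.1 = "F" then pvKey init x.2 else x.1.1), x.1.2)))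
        = pvResolve init rot acts := by
  induction acts with
  | nil => intro rot; simp [pvResolve]
  | cons hd tl ih =>
      intro rot
      obtain ⟨a, p⟩ := hd
      simp only [pvTailScan, List.zip_cons_cons, List.filter_cons, pvResolve]
      by_cases h : a = "L" ∨ a = "R"
      · have hdec : (decide (((a, p), rot).1.1 ≠ "L" ∧ ((a, p), rot).1.1 ≠ "R")) = false := by
          simp; tauto
        rw [hdec, if_pos h]
        exact ih (rot + pvTurn a p)
      · have hdec : (decide (((a, p), rot).1.1 ≠ "L" ∧ ((a, p), rot).1.1 ≠ "R")) = true := by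
          simp; tauto
        rw [hdec, if_neg h]
        exact congrArg _ (ih (rot + pvTurn a p))

-- Stage 3, one element at a time
def pvAgg (counts : PySem.Dict String Int) (moves : List (String × Int)) : PySem.Dict String Int :=
  moves.foldl (fun c dp => c.insert dp.1 (c.getD dp.1 0 + dp.2)) counts

lemma pvAgg_cons (counts : PySem.Dict String Int) (d : String) (p : Int)
    (ms : List (String × Int)) :
    pvAgg counts ((d, p) :: ms) = pvAgg (counts.insert d (counts.getD d 0 + p)) ms := rfl

-- quarter-turn rotations on direction strings, and how pvKey shifts under ±1, ±2, ±3
def pvRotCW (d : String) : String :=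
  if d = "N" then "E" else if d = "E" then "S" else if d = "S" then "W" else "N"

def pvRotCCW (d : String) : String :=
  if d = "N" then "W" else if d = "W" then "S" else if d = "S" then "E" else "N"

lemma pvKey_p1 (init : String) (r : Int) : pvKey init (r + 1) = pvRotCW (pvKey init r) := by
  unfold pvKey pvRotCW
  rw [PySem.Int.mod_eq_emod_of_pos (by norm_num : (0:Int) < 4),
      PySem.Int.mod_eq_emod_of_pos (by norm_num : (0:Int) < 4)]
  set i : Int := (((PySem.List.index? pvOrder init).getD 0 : Nat) : Int) with hi
  have h2 : (i + (r + 1)) % 4 = ((i + r) % 4 + 1) % 4 := by omega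
  have h1 : (i + r) % 4 = 0 ∨ (i + r) % 4 = 1 ∨ (i + r) % 4 = 2 ∨ (i + r) % 4 = 3 := by omega
  rw [h2]
  rcases h1 with h | h | h | h <;> rw [h] <;> decide

lemma pvKey_m1 (init : String) (r : Int) : pvKey init (r + -1) = pvRotCCW (pvKey init r) := by
  unfold pvKey pvRotCCW
  rw [PySem.Int.mod_eq_emod_of_pos (by norm_num : (0:Int) < 4),
      PySem.Int.mod_eq_emod_of_pos (by norm_num : (0:Int) < 4)]
  set i : Int := (((PySem.List.index? pvOrder init).getD 0 : Nat) : Int) with hi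
  have h2 : (i + (r + -1)) % 4 = ((i + r) % 4 + 3) % 4 := by omega
  have h1 : (i + r) % 4 = 0 ∨ (i + r) % 4 = 1 ∨ (i + r) % 4 = 2 ∨ (i + r) % 4 = 3 := by omega
  rw [h2]
  rcases h1 with h | h | h | h <;> rw [h] <;> decide

lemma pvKey_p2 (init : String) (r : Int) :
    pvKey init (r + 2) = pvRotCW (pvRotCW (pvKey init r)) := by
  rw [show r + 2 = r + 1 + 1 from by ring, pvKey_p1, pvKey_p1]

lemma pvKey_p3 (init : String) (r : Int) :
    pvKey init (r + 3) = pvRotCW (pvRotCW (pvRotCW (pvKey init r))) := by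
  rw [show r + 3 = r + 2 + 1 from by ring, pvKey_p1, pvKey_p2]

lemma pvKey_m2 (init : String) (r : Int) :
    pvKey init (r + -2) = pvRotCCW (pvRotCCW (pvKey init r)) := by
  rw [show r + -2 = r + -1 + -1 from by ring, pvKey_m1, pvKey_m1]

lemma pvKey_m3 (init : String) (r : Int) :
    pvKey init (r + -3) = pvRotCCW (pvRotCCW (pvRotCCW (pvKey init r))) := by
  rw [show r + -3 = r + -2 + -1 from by ring, pvKey_m1, pvKey_m2]

-- the heading string of A and the rotation total of B denote the same direction
def pvRel (dir : String) (init : String) (rot : Int) : Prop :=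
  dir = pvKey init rot ∧ (dir = "N" ∨ dir = "E" ∨ dir = "S" ∨ dir = "W")

-- A's fold over enumerate ignores the index component
lemma pvAStep_enum (acts : List (String × Int)) :
    ∀ (s : Int) (st : String × PySem.Dict String Int),
      (PySem.List.enumerate acts s).foldl pvAStep st
        = acts.foldl (fun st e => pvAStep st (0, e)) st := by
  induction acts with
  | nil => intro s st; simp [PySem.List.enumerate_nil]
  | cons hd tl ih =>
      intro s st
      rw [PySem.List.enumerate_cons]
      simp only [List.foldl_cons]
      rw [ih]
      rfl

-- A's step on a turn action, as the raw table lookup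
lemma pvAStep_turn (dir : String) (counts : PySem.Dict String Int) (a : String) (p : Int)
    (ha : a = "L" ∨ a = "R") :
    pvAStep (dir, counts) (0, (a, p)) =
      ((((direction_to_orientation.get? ((direction_from_angle a p).getD "")).getD
          PySem.Dict.empty).get? dir).getD "", counts) := by
  rcases ha with ha | ha <;> subst ha <;> simp [pvAStep]

-- A's fold equals B's aggregation of the resolved list, when the heading is a cardinal
lemma pvLoop_sim (init : String) (acts : List (String × Int)) :
    ∀ (dir : String) (rot : Int) (counts : PySem.Dict String Int),
      pvRel dir init rot →
      (∀ ap ∈ acts, ap.1 = "F" ∨ ap.1 ∈ (["N", "E", "S", "W"] : List String) ∨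
        ((ap.1 = "L" ∨ ap.1 = "R") ∧ (ap.2 = 90 ∨ ap.2 = 180 ∨ ap.2 = 270))) →
      (acts.foldl (fun st e => pvAStep st (0, e)) (dir, counts)).2
        = pvAgg counts (pvResolve init rot acts) := by
  induction acts with
  | nil => intro dir rot counts _ _; rfl
  | cons hd tl ih =>
      intro dir rot counts hrel hv
      have hhd := hv hd (by simp)
      obtain ⟨a, p⟩ := hd
      obtain ⟨hkey, hcard⟩ := hrel
      have hv' : ∀ ap ∈ tl, ap.1 = "F" ∨ ap.1 ∈ (["N", "E", "S", "W"] : List String) ∨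
          ((ap.1 = "L" ∨ ap.1 = "R") ∧ (ap.2 = 90 ∨ ap.2 = 180 ∨ ap.2 = 270)) :=
        fun ap hap => hv ap (List.mem_cons_of_mem _ hap)
      simp only [List.foldl_cons]
      rcases hhd with ha | ha | ⟨ha, hp⟩
      · -- a = "F": both sides charge parameter to the current heading
        subst ha
        have hstep : pvAStep (dir, counts) (0, ("F", p))
            = (dir, counts.insert dir (counts.getD dir 0 + p)) := by simp [pvAStep]
        have hres : pvResolve init rot (("F", p) :: tl)
            = (pvKey init rot, p) :: pvResolve init (rot + pvTurn "F" p) tl := by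
          simp [pvResolve]
        rw [hstep, hres, pvAgg_cons, show pvTurn "F" p = 0 from by simp [pvTurn], add_zero,
          ← hkey]
        exact ih dir rot _ ⟨hkey, hcard⟩ hv'
      · -- a a cardinal: both sides charge parameter to a
        have h1 : (a = "F") = False ∧ (a = "L") = False ∧ (a = "R") = False := by
          fin_cases ha <;> exact ⟨by decide, by decide, by decide⟩
        obtain ⟨hF, hL, hR⟩ := h1
        have hstep : pvAStep (dir, counts) (0, (a, p))
            = (dir, counts.insert a (counts.getD a 0 + p)) := by simp [pvAStep, hF, hL, hR]
        have hres : pvResolve init rot ((a, p) :: tl)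
            = (a, p) :: pvResolve init (rot + pvTurn a p) tl := by
          simp [pvResolve, hF, hL, hR]
        rw [hstep, hres, pvAgg_cons, show pvTurn a p = 0 from by simp [pvTurn, hL, hR],
          add_zero]
        exact ih dir rot _ ⟨hkey, hcard⟩ hv'
      · -- a turn: A consults the table, B shifts the rotation total
        have hres : pvResolve init rot ((a, p) :: tl)
            = pvResolve init (rot + pvTurn a p) tl := by
          rcases ha with h | h <;> subst h <;> simp [pvResolve]
        rw [pvAStep_turn dir counts a p ha, hres]
        rcases ha with ha | ha <;> rcases hp with hp | hp | hp <;> subst ha <;> subst hp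
        · rw [show pvTurn "L" 90 = -1 from by decide]
          refine ih _ _ _ ⟨?_, ?_⟩ hv'
          · rw [pvKey_m1, ← hkey]
            rcases hcard with h | h | h | h <;> subst h <;> decide
          · rcases hcard with h | h | h | h <;> subst h <;> decide
        · rw [show pvTurn "L" 180 = -2 from by decide]
          refine ih _ _ _ ⟨?_, ?_⟩ hv'
          · rw [pvKey_m2, ← hkey]
            rcases hcard with h | h | h | h <;> subst h <;> decide
          · rcases hcard with h | h | h | h <;> subst h <;> decide
        · rw [show pvTurn "L" 270 = -3 from by decide]
          refine ih _ _ _ ⟨?_, ?_⟩ hv'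
          · rw [pvKey_m3, ← hkey]
            rcases hcard with h | h | h | h <;> subst h <;> decide
          · rcases hcard with h | h | h | h <;> subst h <;> decide
        · rw [show pvTurn "R" 90 = 1 from by decide]
          refine ih _ _ _ ⟨?_, ?_⟩ hv'
          · rw [pvKey_p1, ← hkey]
            rcases hcard with h | h | h | h <;> subst h <;> decide
          · rcases hcard with h | h | h | h <;> subst h <;> decide
        · rw [show pvTurn "R" 180 = 2 from by decide]
          refine ih _ _ _ ⟨?_, ?_⟩ hv'
          · rw [pvKey_p2, ← hkey]
            rcases hcard with h | h | h | h <;> subst h <;> decide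
          · rcases hcard with h | h | h | h <;> subst h <;> decide
        · rw [show pvTurn "R" 270 = 3 from by decide]
          refine ih _ _ _ ⟨?_, ?_⟩ hv'
          · rw [pvKey_p3, ← hkey]
            rcases hcard with h | h | h | h <;> subst h <;> decide
          · rcases hcard with h | h | h | h <;> subst h <;> decide

-- when every action is a cardinal the heading is never consulted on either side
lemma pvLoop_card (init : String) (acts : List (String × Int)) :
    ∀ (dir : String) (rot : Int) (counts : PySem.Dict String Int),
      (∀ ap ∈ acts, ap.1 ∈ (["N", "E", "S", "W"] : List String)) →
      (acts.foldl (fun st e => pvAStep st (0, e)) (dir, counts)).2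
        = pvAgg counts (pvResolve init rot acts) := by
  induction acts with
  | nil => intro dir rot counts _; rfl
  | cons hd tl ih =>
      intro dir rot counts hv
      have hhd := hv hd (by simp)
      obtain ⟨a, p⟩ := hd
      have h1 : (a = "F") = False ∧ (a = "L") = False ∧ (a = "R") = False := by
        fin_cases hhd <;> exact ⟨by decide, by decide, by decide⟩
      obtain ⟨hF, hL, hR⟩ := h1
      simp only [List.foldl_cons]
      have hstep : pvAStep (dir, counts) (0, (a, p))
          = (dir, counts.insert a (counts.getD a 0 + p)) := by simp [pvAStep, hF, hL, hR]
      have hres : pvResolve init rot ((a, p) :: tl)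
          = (a, p) :: pvResolve init (rot + pvTurn a p) tl := by
        simp [pvResolve, hF, hL, hR]
      rw [hstep, hres, pvAgg_cons, show pvTurn a p = 0 from by simp [pvTurn, hL, hR], add_zero]
      exact ih _ _ _ (fun ap hap => hv ap (List.mem_cons_of_mem _ hap))

-- ===== VERDICT (by name: the statement is the Claim_ definition above) =====
theorem count_moves_in_each_orientation_spec : Claim_equal_count_moves_in_each_orientation := by
  intro actions initial_direction _ hpre
  obtain ⟨hv, hio⟩ := hpre
  unfold Spec_count_moves_in_each_orientation
  simp only [count_moves_in_each_orientation, count_moves_in_each_orientation_alt]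
  rw [pvAStep_enum]
  have hrots := pvRots_eq actions ([] : List Int) 0
  simp only [List.nil_append] at hrots
  rw [hrots]
  rw [show ([0] ++ pvTailScan 0 actions : List Int) = 0 :: pvTailScan 0 actions from rfl,
    pvMoves_eq initial_direction actions 0]
  rcases hio with hinit | hcard
  · have hrel : pvRel initial_direction initial_direction 0 := by
      simp only [List.mem_cons, List.not_mem_nil, or_false] at hinit
      refine ⟨?_, by tauto⟩
      rcases hinit with h | h | h | h <;> subst h <;> decide
    exact congrArg PySem.Dict.items
      (pvLoop_sim initial_direction actions initial_direction 0
        (PySem.Dict.ofList [("N",0),("E",0),("W",0),("S",0)]) hrel hv)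
  · exact congrArg PySem.Dict.items
      (pvLoop_card initial_direction actions initial_direction 0
        (PySem.Dict.ofList [("N",0),("E",0),("W",0),("S",0)]) hcard)
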